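-- pv_equiv track=rewrite | github.com/snigdha31-code/New-Lightweight-Cryptographic-Algorithm-NLCA- | nlca/nlca_app/nlca_modules/transf.py | transf2
-- ===== SOURCE A (Python) =====
-- def transf2(lst):
--     strr=''
--     for i in range(4):
--         if (i+1)%2==0:
--             j=3
--             while j>=0:
--                 strr+=lst[j][i]
--                 j-=1
--         else:
--             j=0
--             while j<4:
--                 strr+=lst[j][i]
--                 j+=1
--     return strr
-- ===== SOURCE B (Python) =====
-- def transf2(lst):
--     # Serpentine read of the 4x4 block as one flat pass: cell k of the output
--     # comes from column i = k // 4 and row j = k % 4 (even column) or 3 - k % 4 (odd column).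
--     def src_row(k):
--         r = k % 4
--         return r if (k // 4) % 2 == 0 else 3 - r
--     return ''.join(lst[src_row(k)][k // 4] for k in range(16))
-- ===== Notes on version B (the rewrite author's own statement) =====
-- stated objective: alternative
-- what changed: Replaces A's four per-column while-loops with one flat pass over output positions 0..15, computing each source cell by a closed-form serpentine index map (row = k%4 or 3-k%4 by column parity) and joining once.
import Mathlib
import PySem

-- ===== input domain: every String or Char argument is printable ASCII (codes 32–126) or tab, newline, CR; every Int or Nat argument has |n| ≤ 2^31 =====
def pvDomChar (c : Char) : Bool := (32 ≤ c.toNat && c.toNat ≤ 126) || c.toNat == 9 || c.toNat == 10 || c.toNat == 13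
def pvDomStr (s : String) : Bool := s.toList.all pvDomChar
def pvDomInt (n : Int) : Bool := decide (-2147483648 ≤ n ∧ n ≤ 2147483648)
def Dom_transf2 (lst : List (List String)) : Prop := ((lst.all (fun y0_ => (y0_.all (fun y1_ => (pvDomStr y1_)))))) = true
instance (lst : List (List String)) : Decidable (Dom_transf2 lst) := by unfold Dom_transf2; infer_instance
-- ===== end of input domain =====

-- B replaces A's per-column while-loops by one flat pass over output positions 0..15 with a closed-form serpentine index map (alternative decomposition; return value only, no mutation).

-- ===== PORT A =====
-- lst[j][i]; exact on Pre_ (both indices in range there)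
def pvCell (lst : List (List String)) (j i : Int) : String :=
  PySem.List.pyGetD (PySem.List.pyGetD lst j []) i ""

-- 'while j < 4: strr += lst[j][i]; j += 1' (fuel 5 suffices: at most 4 iterations)
def pvUp (lst : List (List String)) (i : Int) : Nat → Int → String → String
  | 0, _, s => s
  | f + 1, j, s => if j < 4 then pvUp lst i f (j + 1) (s ++ pvCell lst j i) else s

-- 'while j >= 0: strr += lst[j][i]; j -= 1'
def pvDown (lst : List (List String)) (i : Int) : Nat → Int → String → String
  | 0, _, s => s
  | f + 1, j, s => if j ≥ 0 then pvDown lst i f (j - 1) (s ++ pvCell lst j i) else s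

def transf2 (lst : List (List String)) : String :=
  (PySem.List.pyRange 0 4 1).foldl
    (fun strr i =>
      if PySem.Int.mod (i + 1) 2 == 0 then pvDown lst i 5 3 strr
      else pvUp lst i 5 0 strr) ""

-- ===== PORT B =====
-- src_row(k): k%4 for an even column k//4, else 3 - k%4
def pvSrcRow (k : Int) : Int :=
  let r := PySem.Int.mod k 4
  if PySem.Int.mod (PySem.Int.floordiv k 4) 2 == 0 then r else 3 - r

def transf2_alt (lst : List (List String)) : String :=
  String.join ((PySem.List.pyRange 0 16 1).map (fun k =>
    pvCell lst (pvSrcRow k) (PySem.Int.floordiv k 4)))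

-- ===== PRECONDITION & SPEC =====
-- Pre_ excludes ragged/short inputs: A raises IndexError unless there are ≥ 4 rows and each of the first 4 rows has ≥ 4 entries.
def Pre_transf2 (lst : List (List String)) : Prop :=
  4 ≤ lst.length ∧ ∀ row ∈ lst.take 4, 4 ≤ row.length
instance (lst : List (List String)) : Decidable (Pre_transf2 lst) := by unfold Pre_transf2; infer_instance

def pvWitness_transf2 : List (List String) :=
  [["a","b","c","d"],["e","f","g","h"],["i","j","k","l"],["m","n","o","p"]]

def Spec_transf2 (lst : List (List String)) (out : String) : Prop := out = transf2_alt lst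
instance (lst : List (List String)) (out : String) : Decidable (Spec_transf2 lst out) := by unfold Spec_transf2; infer_instance

-- ===== CLAIM (what is proved, stated in full; the proofs are below) =====
def Claim_equal_transf2 : Prop := ∀ (lst : List (List String)), Dom_transf2 lst → Pre_transf2 lst → Spec_transf2 lst (transf2 lst)

-- ===== LEMMAS AND PROOFS =====

-- ===== VERDICT (by name: the statement is the Claim_ definition above) =====
theorem transf2_spec : Claim_equal_transf2 := by
  intro lst _ _
  unfold Spec_transf2 transf2 transf2_alt
  simp [PySem.List.pyRange, PySem.Int.mod, PySem.Int.floordiv, pvSrcRow, pvUp, pvDown,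
    String.join, String.append_assoc, List.range_succ, Int.fmod, Int.fdiv]
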